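-- pv_equiv track=rewrite | github.com/chjacob-tubs/pyadf-releases | src/pyadf/kf/_kftools.py | _datablocks
-- ===== SOURCE A (Python) =====
-- from bisect import bisect
--
-- def _datablocks(lst, n=1):
--     """Transform a tuple of lists ``([x1,x2,...], [(a1,b1),(a2,b2),...])`` into an iterator
--     over ``range(a1,b1)+range(a2,b2)+...`` Iteration starts from nth element of this list."""
--     i = bisect(lst[0], n) - 1
--     lb = lst[0][i]
--     first, last = lst[1][i]
--     ret = first + n - lb
--     while i < len(lst[1]):
--         while ret < last:
--             yield ret
--             ret += 1
--         i += 1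
--         if i < len(lst[1]):
--             ret, last = lst[1][i]
-- ===== SOURCE B (Python) =====
-- from itertools import chain, starmap
--
-- def _datablocks(lst, n=1):
--     """Locate the containing block by counting in one pass how many breakpoints
--     are <= n (the breakpoint list is sorted), rewrite the head of the remaining
--     block table to start at element n, and flatten the table uniformly."""
--     i = sum(x <= n for x in lst[0]) - 1
--     a, b = lst[1][i]
--     blocks = [(a + n - lst[0][i], b)] + list(lst[1][i + 1:])
--     yield from chain.from_iterable(starmap(range, blocks))
-- ===== Notes on version B (the rewrite author's own statement) =====
-- stated objective: alternative
-- what changed: A binary-searches (bisect) for the containing block and then hand-steps a counter through nested while loops, yielding a partial first range and resetting the counter at each block; B does a single linear count of breakpoints <= n instead of the binary search (equal because the breakpoint list is sorted), rewrites the head of the remaining block table to start at element n, and flattens that table uniformly with no mutable emission state.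
-- outside the precondition, e.g. on _datablocks(([3, 1], [(0, 2), (5, 9)]), 2): A returns [6, 7, 8], B returns [-1, 0, 1, 5, 6, 7, 8]
import Mathlib
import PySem

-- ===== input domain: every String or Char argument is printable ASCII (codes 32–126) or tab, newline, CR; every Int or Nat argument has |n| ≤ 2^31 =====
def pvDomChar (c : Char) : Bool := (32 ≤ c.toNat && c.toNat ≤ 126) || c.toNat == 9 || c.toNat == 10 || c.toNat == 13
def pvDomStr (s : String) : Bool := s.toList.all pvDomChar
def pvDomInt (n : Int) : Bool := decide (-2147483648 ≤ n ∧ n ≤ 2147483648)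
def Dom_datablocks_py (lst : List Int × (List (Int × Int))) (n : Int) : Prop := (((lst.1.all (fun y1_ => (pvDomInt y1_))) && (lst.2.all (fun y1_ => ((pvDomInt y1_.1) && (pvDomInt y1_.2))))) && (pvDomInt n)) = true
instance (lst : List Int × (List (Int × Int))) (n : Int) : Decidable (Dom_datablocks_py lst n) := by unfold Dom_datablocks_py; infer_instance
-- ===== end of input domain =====

-- B replaces A's bisect plus stateful nested while loops by a linear count of the
-- breakpoints ≤ n followed by a uniform flatten of the rewritten block table (alternative).

-- ===== PORT A =====
-- inner loop: 'while ret < last: yield ret; ret += 1'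
def pvInnerA (ret last : Int) : List Int :=
  if ret < last then ret :: pvInnerA (ret + 1) last else []
termination_by (last - ret).toNat
decreasing_by omega

-- outer loop: 'while i < len(lst[1]): …; i += 1; if i < len(lst[1]): ret, last = lst[1][i]'
def pvOuterA (segs : List (Int × Int)) (i ret last : Int) : List Int :=
  if i < (segs.length : Int) then
    pvInnerA ret last ++
      (if i + 1 < (segs.length : Int) then
        match PySem.List.pyGet? segs (i + 1) with
        | some (r, l) => pvOuterA segs (i + 1) r l
        | none => []          -- unreachable: 0 ≤ i+1 < len segs in this branch
       else pvOuterA segs (i + 1) ret last)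
  else []
termination_by ((segs.length : Int) - i).toNat
decreasing_by all_goals omega

def datablocks_py (lst : List Int × (List (Int × Int))) (n : Int) : List Int :=
  -- i = bisect(lst[0], n) - 1, written out at each use
  match PySem.List.pyGet? lst.1 ((PySem.List.bisectRight lst.1 n : Int) - 1) with
  | none => []                -- IndexError on lst[0][i] (excluded by Pre_)
  | some lb =>
    match PySem.List.pyGet? lst.2 ((PySem.List.bisectRight lst.1 n : Int) - 1) with
    | none => []              -- IndexError on lst[1][i] (excluded by Pre_)
    | some (first, last) =>
      pvOuterA lst.2 ((PySem.List.bisectRight lst.1 n : Int) - 1) (first + n - lb) last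

-- ===== PORT B =====
def datablocks_py_alt (lst : List Int × (List (Int × Int))) (n : Int) : List Int :=
  -- i = sum(x <= n for x in lst[0]) - 1
  match PySem.List.pyGet? lst.2 ((lst.1.map (fun x => if x ≤ n then (1 : Int) else 0)).sum - 1) with
  | none => []                -- IndexError on lst[1][i] (excluded by Pre_)
  | some (a, b) =>
    match PySem.List.pyGet? lst.1 ((lst.1.map (fun x => if x ≤ n then (1 : Int) else 0)).sum - 1) with
    | none => []              -- IndexError on lst[0][i] (excluded by Pre_)
    | some lb =>
      -- blocks = [(a + n - lst[0][i], b)] + list(lst[1][i+1:]); chain.from_iterable(starmap(range, blocks))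
      ((a + n - lb, b) ::
          PySem.List.slice lst.2 (some ((lst.1.map (fun x => if x ≤ n then (1 : Int) else 0)).sum - 1 + 1)) none).flatMap
        (fun p => PySem.List.pyRange p.1 p.2 1)

-- ===== PRECONDITION & SPEC =====
-- Pre_ is the documented shape: a nonempty SORTED breakpoint list (on an unsorted one
-- bisect's answer is an accident of the binary-search path, while A still returns a value —
-- see the cite in claim.json) together with the conditions under which neither index
-- lookup raises: a nonempty block list with a block for every breakpoint ≤ n.
def Pre_datablocks_py (lst : List Int × (List (Int × Int))) (n : Int) : Prop :=
  lst.1 ≠ [] ∧ lst.2 ≠ [] ∧ lst.1.Pairwise (· ≤ ·) ∧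
    lst.1.countP (fun x => decide (x ≤ n)) ≤ lst.2.length
instance (lst : List Int × (List (Int × Int))) (n : Int) : Decidable (Pre_datablocks_py lst n) := by
  unfold Pre_datablocks_py; infer_instance

def pvWitness_datablocks_py : (List Int × (List (Int × Int))) × Int := (([1, 3], [(0, 2), (5, 6)]), 2)

def Spec_datablocks_py (lst : List Int × (List (Int × Int))) (n : Int) (out : List Int) : Prop := out = datablocks_py_alt lst n
instance (lst : List Int × (List (Int × Int))) (n : Int) (out : List Int) : Decidable (Spec_datablocks_py lst n out) := by unfold Spec_datablocks_py; infer_instance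

-- ===== CLAIM (what is proved, stated in full; the proofs are below) =====
def Claim_equal_datablocks_py : Prop := ∀ (lst : List Int × (List (Int × Int))) (n : Int), Dom_datablocks_py lst n → Pre_datablocks_py lst n → Spec_datablocks_py lst n (datablocks_py lst n)

-- ===== LEMMAS AND PROOFS =====

-- A's inner while loop yields exactly range(ret, last).
theorem pvInnerA_eq_pyRange (ret last : Int) :
    pvInnerA ret last = PySem.List.pyRange ret last 1 := by
  by_cases h : ret < last
  · rw [pvInnerA, if_pos h, PySem.List.pyRange_one_cons h,
      pvInnerA_eq_pyRange (ret + 1) last]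
  · rw [pvInnerA, if_neg h, PySem.List.pyRange_one_eq_nil (by omega)]
termination_by (last - ret).toNat
decreasing_by omega

-- A's outer loop = inner range ++ flatten of the remaining segment ranges.
theorem pvOuterA_eq (segs : List (Int × Int)) (i ret last : Int)
    (h0 : -1 ≤ i) (h1 : i < (segs.length : Int)) :
    pvOuterA segs i ret last =
      PySem.List.pyRange ret last 1 ++
        (segs.drop (i + 1).toNat).flatMap (fun p => PySem.List.pyRange p.1 p.2 1) := by
  rw [pvOuterA, if_pos h1, pvInnerA_eq_pyRange]
  by_cases h2 : i + 1 < (segs.length : Int)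
  · rw [if_pos h2, PySem.List.pyGet?_eq_some_getElem segs (by omega) h2]
    have hlt : (i + 1).toNat < segs.length := by omega
    have hdrop : segs.drop (i + 1).toNat = segs[(i + 1).toNat] :: segs.drop ((i + 1).toNat + 1) :=
      List.drop_eq_getElem_cons hlt
    rcases hseg : segs[(i + 1).toNat] with ⟨r, l⟩
    show PySem.List.pyRange ret last 1 ++ pvOuterA segs (i + 1) r l = _
    have hstep : (i + 1 + 1).toNat = (i + 1).toNat + 1 := by omega
    rw [pvOuterA_eq segs (i + 1) r l (by omega) h2, hstep, hdrop, hseg, List.flatMap_cons]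
  · rw [if_neg h2, pvOuterA, if_neg (by omega), List.drop_eq_nil_of_le (by omega)]
    simp
termination_by ((segs.length : Int) - i).toNat
decreasing_by omega

-- on a sorted list, bisect_right is the number of elements ≤ n
theorem pvCount_eq_bisect (xs : List Int) (n : Int) (hs : xs.Pairwise (· ≤ ·)) :
    xs.countP (fun x => decide (x ≤ n)) = PySem.List.bisectRight xs n := by
  obtain ⟨hkle, hklo, hkhi⟩ := PySem.List.bisectRight_spec xs n hs
  set k := PySem.List.bisectRight xs n with hk
  have hsplit : xs.countP (fun x => decide (x ≤ n)) =
      (xs.take k).countP (fun x => decide (x ≤ n)) + (xs.drop k).countP (fun x => decide (x ≤ n)) := by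
    rw [← List.countP_append, List.take_append_drop]
  have h1 : (xs.take k).countP (fun x => decide (x ≤ n)) = (xs.take k).length := by
    apply List.countP_eq_length.mpr
    intro a ha
    rw [List.mem_take_iff_getElem] at ha
    obtain ⟨j, hj, rfl⟩ := ha
    simpa using hklo j (by omega) (by omega)
  have h2 : (xs.drop k).countP (fun x => decide (x ≤ n)) = 0 := by
    apply List.countP_eq_zero.mpr
    intro a ha
    rw [List.mem_drop_iff_getElem] at ha
    obtain ⟨j, hj, rfl⟩ := ha
    simpa using Int.not_le.mpr (hkhi (k + j) (by omega) (by omega))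
  rw [hsplit, h1, h2, List.length_take]
  omega

theorem datablocks_eq (lst : List Int × (List (Int × Int))) (n : Int)
    (hpre : Pre_datablocks_py lst n) :
    datablocks_py lst n = datablocks_py_alt lst n := by
  obtain ⟨xs, segs⟩ := lst
  obtain ⟨hxne, hsne, hsorted, hcle⟩ := hpre
  simp only at hxne hsne hsorted hcle
  have hxm : 0 < xs.length := List.length_pos_iff.mpr hxne
  have hsm : 0 < segs.length := List.length_pos_iff.mpr hsne
  obtain ⟨hkle, _, _⟩ := PySem.List.bisectRight_spec xs n hsorted
  set k := PySem.List.bisectRight xs n with hk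
  have hck : xs.countP (fun x => decide (x ≤ n)) = k := pvCount_eq_bisect xs n hsorted
  have hsum : (xs.map (fun x => if x ≤ n then (1 : Int) else 0)).sum - 1 = (k : Int) - 1 := by
    have := PySem.List.sum_map_ite_one_zero (fun x => decide (x ≤ n)) xs
    simp only [decide_eq_true_eq] at this
    rw [this, hck]
  have hkseg : k ≤ segs.length := hck ▸ hcle
  unfold datablocks_py datablocks_py_alt
  simp only [← hk, hsum]
  have hxin : PySem.Raise.InRange xs.length ((k : Int) - 1) := by
    constructor <;> omega
  have hsin : PySem.Raise.InRange segs.length ((k : Int) - 1) := by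
    constructor <;> omega
  cases hxg : PySem.List.pyGet? xs ((k : Int) - 1) with
  | none => exact absurd hxin ((PySem.List.pyGet?_eq_none_iff xs _).mp hxg)
  | some lb =>
    cases hsg : PySem.List.pyGet? segs ((k : Int) - 1) with
    | none => exact absurd hsin ((PySem.List.pyGet?_eq_none_iff segs _).mp hsg)
    | some p =>
      rcases p with ⟨a, b⟩
      dsimp only
      rw [pvOuterA_eq segs ((k : Int) - 1) (a + n - lb) b (by omega) (by omega),
        List.flatMap_cons, PySem.List.slice_from segs (by omega)]

-- ===== VERDICT (by name: the statement is the Claim_ definition above) =====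
theorem datablocks_py_spec : Claim_equal_datablocks_py := by
  intro lst n _ hpre
  unfold Spec_datablocks_py
  exact datablocks_eq lst n hpre
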